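-- pv_equiv track=rewrite | github.com/kayoung-dev/problem-solving | generator/level01/g079.py | solve_internal
-- ===== SOURCE A (Python) =====
-- from collections import deque
--
-- def solve_internal(n, k, scores):
--     dp = [0] * n
--     dq = deque()
--     for i in range(n):
--         if dq and dq[0] < i - k: dq.popleft()
--         dp[i] = scores[i] + max(0, dp[dq[0]] if dq else 0)
--         while dq and dp[i] >= dp[dq[-1]]: dq.pop()
--         dq.append(i)
--     return str(max(dp))
-- ===== SOURCE B (Python) =====
-- def solve_internal(n, k, scores):
--     dp = []
--     for i in range(n):
--         lo = max(0, i - k)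
--         best = max(dp[lo:i], default=0)
--         dp.append(scores[i] + max(0, best))
--     return str(max(dp))
-- ===== Notes on version B (the rewrite author's own statement) =====
-- stated objective: simpler
-- what changed: Replaces the monotonic deque of A with a direct max-scan over the previous k dp entries (same recurrence, no maintained structure), building dp by appends.
import Mathlib
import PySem

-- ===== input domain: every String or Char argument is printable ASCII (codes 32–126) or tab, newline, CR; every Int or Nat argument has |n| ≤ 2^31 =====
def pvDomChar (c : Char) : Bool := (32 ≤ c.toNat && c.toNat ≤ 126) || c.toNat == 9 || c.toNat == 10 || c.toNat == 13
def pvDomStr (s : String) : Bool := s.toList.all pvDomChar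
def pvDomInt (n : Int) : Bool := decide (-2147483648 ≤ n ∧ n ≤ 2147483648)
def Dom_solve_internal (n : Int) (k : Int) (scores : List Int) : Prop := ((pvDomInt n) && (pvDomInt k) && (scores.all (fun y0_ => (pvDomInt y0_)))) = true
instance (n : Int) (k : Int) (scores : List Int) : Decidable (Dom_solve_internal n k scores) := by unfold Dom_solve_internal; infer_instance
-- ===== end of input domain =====

-- B replaces A's monotonic deque with a direct max-scan of the previous k dp entries
-- (same recurrence, no maintained structure); objective: simpler, not faster.

-- ===== PORT A =====
-- the 'while dq and dp[i] >= dp[dq[-1]]: dq.pop()' loop, run on the reversed deque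
def solvePops (dp : List Int) (x : Int) : List Int → List Int
  | [] => []
  | j :: rest => if PySem.List.pyGetD dp j 0 ≤ x then solvePops dp x rest else j :: rest

-- 'if dq and dq[0] < i - k: dq.popleft()'
def solvePopFront (kk i : Int) : List Int → List Int
  | [] => []
  | j :: rest => if j < i - kk then rest else j :: rest

-- 'dp[dq[0]] if dq else 0'
def solveFrontMax (dp : List Int) : List Int → Int
  | [] => 0
  | j :: _ => PySem.List.pyGetD dp j 0

-- one iteration of A's 'for i in range(n)' body; state = (dp, dq)
-- (list indexing is pyGetD/pySetD: in range on every input Pre_ admits)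
def solveStepA (k : Int) (scores : List Int) (st : List Int × List Int) (i : Int) : List Int × List Int :=
  let dq1 := solvePopFront k i st.2
  let v := PySem.List.pyGetD scores i 0 + max 0 (solveFrontMax st.1 dq1)
  let dp2 := PySem.List.pySetD st.1 i v
  (dp2, (solvePops dp2 v dq1.reverse).reverse ++ [i])

def solve_internal (n : Int) (k : Int) (scores : List Int) : String :=
  let res := (PySem.List.pyRange 0 n 1).foldl (solveStepA k scores) (List.replicate n.toNat 0, [])
  PySem.Int.toStr ((PySem.List.max? res.1 (fun y => y)).getD 0)

-- ===== PORT B =====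
-- one iteration of B's loop: scan dp[lo:i] for the window max, append the new entry
def solveStepB (k : Int) (scores : List Int) (dp : List Int) (i : Int) : List Int :=
  let lo := max 0 (i - k)
  let best := (PySem.List.max? (PySem.List.slice dp (some lo) (some i)) (fun y => y)).getD 0
  dp ++ [PySem.List.pyGetD scores i 0 + max 0 best]

def solve_internal_alt (n : Int) (k : Int) (scores : List Int) : String :=
  let dp := (PySem.List.pyRange 0 n 1).foldl (solveStepB k scores) []
  PySem.Int.toStr ((PySem.List.max? dp (fun y => y)).getD 0)

-- ===== PRECONDITION & SPEC =====
-- Pre_ excludes exactly the inputs where Python A raises: n ≤ 0 (ValueError from max([]))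
-- and n > len(scores) (IndexError on scores[i]).
def Pre_solve_internal (n : Int) (k : Int) (scores : List Int) : Prop :=
  1 ≤ n ∧ n ≤ (scores.length : Int)
instance (n : Int) (k : Int) (scores : List Int) : Decidable (Pre_solve_internal n k scores) := by unfold Pre_solve_internal; infer_instance

def pvWitness_solve_internal : Int × Int × List Int := (3, 1, [1, -2, 3])

def Spec_solve_internal (n : Int) (k : Int) (scores : List Int) (out : String) : Prop := out = solve_internal_alt n k scores
instance (n : Int) (k : Int) (scores : List Int) (out : String) : Decidable (Spec_solve_internal n k scores out) := by unfold Spec_solve_internal; infer_instance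

-- ===== CLAIM (what is proved, stated in full; the proofs are below) =====
def Claim_equal_solve_internal : Prop := ∀ (n : Int) (k : Int) (scores : List Int), Dom_solve_internal n k scores → Pre_solve_internal n k scores → Spec_solve_internal n k scores (solve_internal n k scores)

-- ===== LEMMAS AND PROOFS =====

-- dp[j] as both ports read it
def dval (D : List Int) (j : Int) : Int := PySem.List.pyGetD D j 0

-- 'dp[dq[0]] if dq else 0'
def headVal (D : List Int) : List Int → Int
  | [] => 0
  | j :: _ => dval D j

-- B's dp after m iterations
def Bdp (k : Int) (scores : List Int) : Nat → List Int
  | 0 => []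
  | m+1 => solveStepB k scores (Bdp k scores m) (m : Int)

-- A's state after m iterations (N = n.toNat fixes the preallocated length)
def Ast (k : Int) (scores : List Int) (N : Nat) : Nat → List Int × List Int
  | 0 => (List.replicate N 0, [])
  | m+1 => solveStepA k scores (Ast k scores N m) (m : Int)

-- the deque invariant after m iterations, vals read in D = Bdp m
def DqInv (k : Int) (D : List Int) (m : Nat) (dq : List Int) : Prop :=
  dq.Pairwise (· < ·) ∧
  (∀ j ∈ dq, 0 ≤ j ∧ j ≤ (m : Int) - 1 ∧ ((m : Int) - 1 - k ≤ j ∨ j = (m : Int) - 1)) ∧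
  dq.Pairwise (fun a b => dval D b < dval D a) ∧
  (∀ j : Int, 0 ≤ j → (m : Int) - k ≤ j → j ≤ (m : Int) - 1 → ∃ q ∈ dq, j ≤ q ∧ dval D j ≤ dval D q)

theorem length_Bdp (k : Int) (scores : List Int) (m : Nat) : (Bdp k scores m).length = m := by
  induction m with
  | zero => rfl
  | succ m ih => simp [Bdp, solveStepB, ih]

theorem dval_append (D E : List Int) (j : Int) (h0 : 0 ≤ j) (h : j < (D.length : Int)) :
    dval (D ++ E) j = dval D j := by
  unfold dval
  rw [PySem.List.pyGetD_eq_getElem (D ++ E) 0 h0 (by simp; omega),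
      PySem.List.pyGetD_eq_getElem D 0 h0 h]
  exact List.getElem_append_left (by omega)

theorem dval_concat_self (D : List Int) (x : Int) : dval (D ++ [x]) (D.length : Int) = x := by
  unfold dval
  rw [PySem.List.pyGetD_eq_getElem (D ++ [x]) 0 (by positivity) (by simp)]
  simp

-- window = dp[lo:len(dp)] is a drop
theorem window_eq_drop (D : List Int) (lo : Int) (h0 : 0 ≤ lo) :
    PySem.List.slice D (some lo) (some (D.length : Int)) = D.drop lo.toNat := by
  rw [PySem.List.slice_toNat D h0 (by positivity)]
  rw [List.take_of_length_le (by simp)]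

theorem mem_window_iff (D : List Int) (L : Nat) (y : Int) :
    y ∈ D.drop L ↔ ∃ t : Nat, L ≤ t ∧ t < D.length ∧ D[t]? = some y := by
  constructor
  · intro hy
    rcases List.mem_iff_getElem.mp hy with ⟨i, hi, hval⟩
    have hi' : L + i < D.length := by simp at hi; omega
    refine ⟨L + i, by omega, hi', ?_⟩
    rw [List.getElem?_eq_getElem hi']
    rw [← hval, List.getElem_drop]
  · rintro ⟨t, hL, ht, hval⟩
    have hv : D[t] = y := by rw [List.getElem?_eq_getElem ht] at hval; exact Option.some.inj hval
    apply List.mem_iff_getElem.mpr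
    refine ⟨t - L, by simp; omega, ?_⟩
    rw [List.getElem_drop]
    rw [← hv]
    congr 1
    omega

-- solvePops facts
theorem solvePops_suffix (d : List Int) (x : Int) (l : List Int) : (solvePops d x l).IsSuffix l := by
  induction l with
  | nil => simp [solvePops]
  | cons j rest ih =>
    by_cases h : PySem.List.pyGetD d j 0 ≤ x
    · simp only [solvePops, if_pos h]; exact ih.trans (List.suffix_cons j rest)
    · simp [solvePops, if_neg h]

theorem solvePops_mem_or (d : List Int) (x : Int) (l : List Int) (q : Int) (hq : q ∈ l) :
    q ∈ solvePops d x l ∨ PySem.List.pyGetD d q 0 ≤ x := by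
  induction l with
  | nil => simp at hq
  | cons j rest ih =>
    by_cases h : PySem.List.pyGetD d j 0 ≤ x
    · simp only [solvePops, if_pos h]
      rcases List.mem_cons.mp hq with rfl | hq'
      · exact Or.inr h
      · exact ih hq'
    · simp only [solvePops, if_neg h]; exact Or.inl hq

theorem solvePops_head (d : List Int) (x : Int) (l : List Int) (j : Int) (rest : List Int)
    (h : solvePops d x l = j :: rest) : ¬ PySem.List.pyGetD d j 0 ≤ x := by
  induction l with
  | nil => simp [solvePops] at h
  | cons a tl ih =>
    by_cases ha : PySem.List.pyGetD d a 0 ≤ x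
    · simp only [solvePops, if_pos ha] at h; exact ih h
    · simp only [solvePops, if_neg ha] at h
      obtain ⟨rfl, -⟩ := List.cons.inj h
      exact ha


-- the deque after the conditional popleft at step m
theorem dq1_spec (k : Int) (m : Nat) (dq : List Int)
    (hpw : dq.Pairwise (· < ·))
    (hb : ∀ j ∈ dq, 0 ≤ j ∧ j ≤ (m : Int) - 1 ∧ ((m : Int) - 1 - k ≤ j ∨ j = (m : Int) - 1)) :
    (solvePopFront k (m : Int) dq).Sublist dq ∧
    (∀ j ∈ solvePopFront k (m : Int) dq, (m : Int) - k ≤ j) ∧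
    (∀ q ∈ dq, (m : Int) - k ≤ q → q ∈ solvePopFront k (m : Int) dq) := by
  cases dq with
  | nil => simp [solvePopFront]
  | cons f rest =>
    rcases List.pairwise_cons.mp hpw with ⟨hf, -⟩
    obtain ⟨hf0, hf1, hf2⟩ := hb f (by simp)
    by_cases hpop : f < (m : Int) - k
    · simp only [solvePopFront, if_pos hpop]
      refine ⟨List.sublist_cons_self f rest, ?_, ?_⟩
      · intro j hj
        obtain ⟨h0, h1, h2⟩ := hb j (by simp [hj])
        have hfj : f < j := hf j hj
        omega
      · intro q hq hqk
        rcases List.mem_cons.mp hq with rfl | hq'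
        · omega
        · exact hq'
    · simp only [solvePopFront, if_neg hpop]
      refine ⟨List.Sublist.refl _, ?_, fun q hq _ => hq⟩
      intro j hj
      rcases List.mem_cons.mp hj with rfl | hj'
      · omega
      · have := hf j hj'
        omega

-- after popleft, the deque head (if any) is exactly B's window max
theorem head_eq_best (k : Int) (m : Nat) (D : List Int) (hD : D.length = m) (dq dq1 : List Int)
    (hdom : ∀ j : Int, 0 ≤ j → (m : Int) - k ≤ j → j ≤ (m : Int) - 1 →
       ∃ q ∈ dq, j ≤ q ∧ dval D j ≤ dval D q)
    (hb : ∀ j ∈ dq, 0 ≤ j ∧ j ≤ (m : Int) - 1 ∧ ((m : Int) - 1 - k ≤ j ∨ j = (m : Int) - 1))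
    (hlow : ∀ j ∈ dq1, (m : Int) - k ≤ j)
    (hsurv : ∀ q ∈ dq, (m : Int) - k ≤ q → q ∈ dq1)
    (hsubl : dq1.Sublist dq)
    (hpw1 : dq1.Pairwise (fun a b => dval D b < dval D a)) :
    headVal D dq1
      = (PySem.List.max? (PySem.List.slice D (some (max 0 ((m : Int) - k))) (some (m : Int)))
          (fun y => y)).getD 0 := by
  set lo : Int := max 0 ((m : Int) - k) with hlo
  set L : Nat := lo.toNat with hL
  have hw : PySem.List.slice D (some lo) (some (m : Int)) = D.drop L := by
    have h := window_eq_drop D lo (by positivity)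
    rw [hD] at h
    exact h
  rw [hw]
  have hloL : (L : Int) = lo := Int.toNat_of_nonneg (by positivity)
  cases dq1 with
  | nil =>
    have hW : D.drop L = [] := by
      by_contra hne
      obtain ⟨y, hy⟩ := List.exists_mem_of_ne_nil _ hne
      obtain ⟨t, htL, htm, -⟩ := (mem_window_iff D L y).mp hy
      have hlot : lo ≤ (t:Int) := by rw [← hloL]; exact_mod_cast htL
      obtain ⟨q, hq, hqt, -⟩ := hdom (t : Int) (by positivity) (by omega) (by omega)
      exact (List.not_mem_nil (a := q)) (hsurv q hq (by omega))
    rw [hW]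
    rfl
  | cons h t =>
    have hhdq : h ∈ dq := hsubl.mem (by simp)
    obtain ⟨hh0, hh1, -⟩ := hb h hhdq
    have hhk : (m : Int) - k ≤ h := hlow h (by simp)
    have hloh : lo ≤ h := by omega
    have hhW : dval D h ∈ D.drop L := by
      apply (mem_window_iff D L (dval D h)).mpr
      refine ⟨h.toNat, ?_, by omega, ?_⟩
      · omega
      · rw [List.getElem?_eq_getElem (by omega)]
        unfold dval
        rw [PySem.List.pyGetD_eq_getElem D 0 hh0 (by omega)]
    cases hmax : PySem.List.max? (D.drop L) (fun y => y) with
    | none =>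
      rw [(PySem.List.max?_eq_none_iff _ _).mp hmax] at hhW
      simp at hhW
    | some M =>
      have hle : dval D h ≤ M := PySem.List.max?_isMax hmax _ hhW
      have hMW := PySem.List.max?_mem hmax
      obtain ⟨t', ht'L, ht'm, ht'val⟩ := (mem_window_iff D L M).mp hMW
      have hMval : M = dval D t' := by
        rw [List.getElem?_eq_getElem ht'm] at ht'val
        unfold dval
        rw [PySem.List.pyGetD_eq_getElem D 0 (by positivity) (by exact_mod_cast ht'm)]
        simp [← Option.some.inj ht'val]
      have hlot' : lo ≤ (t' : Int) := by rw [← hloL]; exact_mod_cast ht'L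
      obtain ⟨q, hq, hqt, hqval⟩ := hdom (t' : Int) (by positivity) (by omega)
        (by omega)
      have hq1 : q ∈ h :: t := hsurv q hq (by omega)
      have hqh : dval D q ≤ dval D h := by
        rcases List.mem_cons.mp hq1 with rfl | hq'
        · exact le_refl _
        · exact le_of_lt ((List.pairwise_cons.mp hpw1).1 q hq')
      have : M ≤ dval D h := by rw [hMval]; exact hqval.trans hqh
      simp only [headVal, Option.getD_some]
      omega

-- writing dp[i] on the zero-padded tail
theorem set_padded (D : List Int) (m N : Nat) (hD : D.length = m) (hm : m < N) (x : Int) :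
    PySem.List.pySetD (D ++ List.replicate (N - m) 0) (m : Int) x
      = (D ++ [x]) ++ List.replicate (N - (m + 1)) 0 := by
  rw [PySem.List.pySetD_natCast]
  have hrep : N - m = (N - (m + 1)) + 1 := by omega
  rw [hrep, List.replicate_succ, List.set_append]
  simp [hD]

-- the while-pop + append re-establishes the invariant for step m+1
theorem new_dq_inv (k : Int) (m : Nat) (D : List Int) (hD : D.length = m)
    (x : Int) (d : List Int) (dq dq1 : List Int)
    (hinv : DqInv k D m dq)
    (hlow : ∀ j ∈ dq1, (m : Int) - k ≤ j)
    (hsurv : ∀ q ∈ dq, (m : Int) - k ≤ q → q ∈ dq1)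
    (hsubl : dq1.Sublist dq)
    (hd : ∀ j : Int, 0 ≤ j → j < (m : Int) → PySem.List.pyGetD d j 0 = dval D j) :
    DqInv k (D ++ [x]) (m + 1) ((solvePops d x dq1.reverse).reverse ++ [(m : Int)]) := by
  obtain ⟨hpw, hb, hdec, hdom⟩ := hinv
  have hb1 : ∀ j ∈ dq1, 0 ≤ j ∧ j ≤ (m : Int) - 1 := fun j hj =>
    ⟨(hb j (hsubl.mem hj)).1, (hb j (hsubl.mem hj)).2.1⟩
  have hkept : ((solvePops d x dq1.reverse).reverse).Sublist dq1 := by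
    have := (solvePops_suffix d x dq1.reverse).sublist
    have h2 := this.reverse
    rwa [List.reverse_reverse] at h2
  have hkmem : ∀ a ∈ (solvePops d x dq1.reverse).reverse, a ∈ dq1 := fun a ha => hkept.mem ha
  have hdval_self : dval (D ++ [x]) (m : Int) = x := by
    have := dval_concat_self D x
    rwa [hD] at this
  have hdval_keep : ∀ j : Int, 0 ≤ j → j < (m : Int) → dval (D ++ [x]) j = dval D j := by
    intro j h0 h1
    exact dval_append D [x] j h0 (by omega)
  -- val of every kept element exceeds x
  have hkgt : ∀ a ∈ (solvePops d x dq1.reverse).reverse, x < dval D a := by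
    intro a ha
    rw [List.mem_reverse] at ha
    cases hres : solvePops d x dq1.reverse with
    | nil => rw [hres] at ha; simp at ha
    | cons q0 rest =>
      rw [hres] at ha
      have hq0dq1 : q0 ∈ dq1 := by
        have : q0 ∈ dq1.reverse := (solvePops_suffix d x dq1.reverse).mem (by rw [hres]; simp)
        rwa [List.mem_reverse] at this
      have hq0x : x < dval D q0 := by
        have hnp := solvePops_head d x dq1.reverse q0 rest hres
        obtain ⟨h0, h1⟩ := hb1 q0 hq0dq1
        rw [hd q0 h0 (by omega)] at hnp
        omega
      rcases List.mem_cons.mp ha with rfl | ha'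
      · exact hq0x
      · -- a comes after q0 in dq1.reverse, i.e. before q0 in dq1: its val is larger still
        have hpwrev : dq1.reverse.Pairwise (fun a b => dval D a < dval D b) := by
          rw [List.pairwise_reverse]
          exact (hdec.sublist hsubl)
        have hsl : (q0 :: rest).Sublist dq1.reverse := by
          rw [← hres]; exact (solvePops_suffix d x dq1.reverse).sublist
        have := (List.pairwise_cons.mp (hpwrev.sublist hsl)).1 a ha'
        omega
  refine ⟨?_, ?_, ?_, ?_⟩
  · -- strictly increasing
    rw [List.pairwise_append]
    refine ⟨(hpw.sublist (hkept.trans hsubl)), by simp, ?_⟩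
    intro a ha b hb'
    have := (hb1 a (hkmem a ha)).2
    simp at hb'
    omega
  · -- bounds
    intro j hj
    rcases List.mem_append.mp hj with hj' | hj'
    · obtain ⟨h0, h1⟩ := hb1 j (hkmem j hj')
      have h2 := hlow j (hkmem j hj')
      push_cast
      omega
    · simp at hj'
      subst hj'
      push_cast
      omega
  · -- strictly decreasing vals in D ++ [x]
    rw [List.pairwise_append]
    refine ⟨?_, by simp, ?_⟩
    · apply ((hdec.sublist hsubl).sublist hkept).imp_of_mem
      intro a b ha hb' hab
      obtain ⟨ha0, ha1⟩ := hb1 a (hkmem a ha)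
      obtain ⟨hb0, hb1'⟩ := hb1 b (hkmem b hb')
      rw [hdval_keep a ha0 (by omega), hdval_keep b hb0 (by omega)]
      exact hab
    · intro a ha b hb'
      simp at hb'
      subst hb'
      obtain ⟨ha0, ha1⟩ := hb1 a (hkmem a ha)
      rw [hdval_self, hdval_keep a ha0 (by omega)]
      exact hkgt a ha
  · -- domination for the next window
    intro j h0 hk1 hm1
    push_cast at hk1 hm1
    by_cases hjm : j = (m : Int)
    · subst hjm
      exact ⟨(m : Int), by simp, le_refl _, le_refl _⟩
    · obtain ⟨q, hq, hqj, hqval⟩ := hdom j h0 (by omega) (by omega)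
      have hq1 : q ∈ dq1 := hsurv q hq (by omega)
      obtain ⟨hq0, hqm⟩ := hb1 q hq1
      rcases solvePops_mem_or d x dq1.reverse q (by rwa [List.mem_reverse]) with hkeep | hle
      · refine ⟨q, List.mem_append.mpr (Or.inl (by rwa [List.mem_reverse])), hqj, ?_⟩
        rw [hdval_keep j h0 (by omega), hdval_keep q hq0 (by omega)]
        exact hqval
      · refine ⟨(m : Int), by simp, by omega, ?_⟩
        rw [hdval_keep j h0 (by omega), hdval_self]
        rw [hd q hq0 (by omega)] at hle
        omega


-- one full iteration: A's step on the padded dp matches B's step, invariant re-established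
theorem step_main (k : Int) (scores : List Int) (N m : Nat) (hm : m < N)
    (D dq : List Int) (hlen : D.length = m)
    (hinv : DqInv k D m dq) :
    (solveStepA k scores (D ++ List.replicate (N - m) 0, dq) (m : Int)).1
        = solveStepB k scores D (m : Int) ++ List.replicate (N - (m + 1)) 0
    ∧ DqInv k (solveStepB k scores D (m : Int)) (m + 1)
        (solveStepA k scores (D ++ List.replicate (N - m) 0, dq) (m : Int)).2 := by
  obtain ⟨hpw, hb, hdec, hdom⟩ := hinv
  obtain ⟨hsubl, hlow, hsurv⟩ := dq1_spec k m dq hpw hb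
  have hpw1 : (solvePopFront k (m : Int) dq).Pairwise (fun a b => dval D b < dval D a) :=
    hdec.sublist hsubl
  have hhead := head_eq_best k m D hlen dq (solvePopFront k (m : Int) dq)
    hdom hb hlow hsurv hsubl hpw1
  set best : Int :=
    (PySem.List.max? (PySem.List.slice D (some (max 0 ((m : Int) - k))) (some (m : Int)))
      (fun y => y)).getD 0 with hbest
  set v : Int := PySem.List.pyGetD scores (m : Int) 0 + max 0 best with hv
  have hmatch : solveFrontMax (D ++ List.replicate (N - m) 0) (solvePopFront k (m : Int) dq)
      = headVal D (solvePopFront k (m : Int) dq) := by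
    cases hq1 : solvePopFront k (m : Int) dq with
    | nil => rfl
    | cons h t =>
      obtain ⟨h0, h1, -⟩ := hb h (hsubl.mem (by rw [hq1]; simp))
      exact dval_append D _ h h0 (by omega)
  have hB : solveStepB k scores D (m : Int) = D ++ [v] := rfl
  have hA : solveStepA k scores (D ++ List.replicate (N - m) 0, dq) (m : Int)
      = (PySem.List.pySetD (D ++ List.replicate (N - m) 0) (m : Int) v,
         (solvePops (PySem.List.pySetD (D ++ List.replicate (N - m) 0) (m : Int) v) v
            (solvePopFront k (m : Int) dq).reverse).reverse ++ [(m : Int)]) := by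
    simp only [solveStepA]
    rw [hmatch, hhead]
  have hset := set_padded D m N hlen hm v
  have hd : ∀ j : Int, 0 ≤ j → j < (m : Int) →
      PySem.List.pyGetD (PySem.List.pySetD (D ++ List.replicate (N - m) 0) (m : Int) v) j 0
        = dval D j := by
    intro j h0 h1
    rw [hset]
    have e1 : PySem.List.pyGetD ((D ++ [v]) ++ List.replicate (N - (m + 1)) 0) j 0
        = dval ((D ++ [v]) ++ List.replicate (N - (m + 1)) 0) j := rfl
    rw [e1, dval_append _ _ j h0 (by simp; omega), dval_append D [v] j h0 (by omega)]
  constructor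
  · rw [hA, hB, hset]
  · rw [hA, hB]
    exact new_dq_inv k m D hlen v _ dq (solvePopFront k (m : Int) dq)
      ⟨hpw, hb, hdec, hdom⟩ hlow hsurv hsubl hd

-- the main invariant
theorem main_inv (k : Int) (scores : List Int) (N : Nat) :
    ∀ m, m ≤ N →
      (Ast k scores N m).1 = Bdp k scores m ++ List.replicate (N - m) 0 ∧
      DqInv k (Bdp k scores m) m (Ast k scores N m).2 := by
  intro m
  induction m with
  | zero =>
    intro _
    refine ⟨by simp [Ast, Bdp], ?_⟩
    unfold DqInv
    simp only [Ast]
    refine ⟨List.Pairwise.nil, by simp, List.Pairwise.nil, ?_⟩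
    intro j h0 hk hm1
    exfalso
    push_cast at hm1
    omega
  | succ m ih =>
    intro hm1
    obtain ⟨hdp, hq⟩ := ih (by omega)
    have hpair : Ast k scores N m
        = (Bdp k scores m ++ List.replicate (N - m) 0, (Ast k scores N m).2) :=
      Prod.ext hdp rfl
    have hstep : Ast k scores N (m + 1) = solveStepA k scores (Ast k scores N m) (m : Int) := rfl
    have hBstep : Bdp k scores (m + 1) = solveStepB k scores (Bdp k scores m) (m : Int) := rfl
    rw [hstep, hBstep, hpair]
    exact step_main k scores N m (by omega) (Bdp k scores m) (Ast k scores N m).2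
      (length_Bdp k scores m) hq

theorem foldlA (k : Int) (scores : List Int) (N : Nat) (M : Nat) :
    (List.range M).foldl (fun st (j : Nat) => solveStepA k scores st (j : Int)) (List.replicate N 0, []) =
      Ast k scores N M := by
  induction M with
  | zero => rfl
  | succ M ih => rw [List.range_succ, List.foldl_append, ih]; rfl

theorem foldlB (k : Int) (scores : List Int) (M : Nat) :
    (List.range M).foldl (fun dp (j : Nat) => solveStepB k scores dp (j : Int)) [] = Bdp k scores M := by
  induction M with
  | zero => rfl
  | succ M ih => rw [List.range_succ, List.foldl_append, ih]; rfl

-- ===== VERDICT (by name: the statement is the Claim_ definition above) =====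
theorem solve_internal_spec : Claim_equal_solve_internal := by
  intro n k scores _ _
  unfold Spec_solve_internal solve_internal solve_internal_alt
  have hr : PySem.List.pyRange 0 n 1 = (List.range n.toNat).map (fun j : Nat => (j : Int)) := by
    rw [PySem.List.pyRange_one]
    simp
  rw [hr, List.foldl_map, List.foldl_map, foldlA, foldlB]
  have := (main_inv k scores n.toNat n.toNat le_rfl).1
  simp only [Nat.sub_self, List.replicate_zero, List.append_nil] at this
  dsimp only
  rw [this]
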